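-- pv_equiv track=rewrite | github.com/Andre-N-Costa/Laboratorios-Algoritmia-II | Treino/apelidos.py | apelidos
-- ===== SOURCE A (Python) =====
-- def apelidos(nomes):
--     napelidos = []
--     new = []
--     j = 1
--     ord = sorted(nomes)
--     for i in range(len(nomes)):
--         napelidos.append(ord[i].count(" "))
--     while j <= max(napelidos):
--         while napelidos.count(j) != 0:
--             ind = napelidos.index(j)
--             napelidos[ind] = -1
--             new.append(ord[ind])
--         j+=1
--     return new
-- ===== SOURCE B (Python) =====
-- def apelidos(nomes):
--     counts = [n.count(" ") for n in nomes]
--     m = max(counts)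
--     buckets = [[] for _ in range(m + 1)]
--     for n, c in zip(nomes, counts):
--         buckets[c].append(n)
--     res = []
--     for j in range(1, m + 1):
--         res.extend(sorted(buckets[j]))
--     return res
-- ===== Notes on version B (the rewrite author's own statement) =====
-- stated objective: faster
-- what changed: A repeatedly rescans the whole count list with count()/index() while destructively marking entries; B makes one bucketing pass that groups names by space count into an array of buckets indexed by count, then sorts each bucket once and concatenates buckets 1..max.
import Mathlib
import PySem

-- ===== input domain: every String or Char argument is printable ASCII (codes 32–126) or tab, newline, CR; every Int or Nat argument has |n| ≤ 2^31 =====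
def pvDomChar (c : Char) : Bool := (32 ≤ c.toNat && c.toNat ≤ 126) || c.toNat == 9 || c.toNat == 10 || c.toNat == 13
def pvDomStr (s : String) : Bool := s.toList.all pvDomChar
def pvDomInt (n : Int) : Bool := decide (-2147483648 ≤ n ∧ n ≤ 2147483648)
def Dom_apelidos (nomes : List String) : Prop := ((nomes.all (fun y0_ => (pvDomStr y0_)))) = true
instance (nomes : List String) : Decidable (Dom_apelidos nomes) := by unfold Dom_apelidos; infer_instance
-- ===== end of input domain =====

-- B replaces A's repeated count/index/mark scans by one bucketing pass over the names plus a sort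
-- per space-count bucket (objective: a different, faster algorithm; return value only, no mutation).

-- ===== PORT A =====
-- number of spaces in a name (s.count(" "))
def pvCnt (s : String) : Int := (PySem.Str.count s " " : Int)

-- inner 'while napelidos.count(j) != 0' loop; fuel = the count of j, exactly the number of
-- iterations Python performs (fuel only makes the recursion total, it changes no value).
def pvInnerA (fuel : Nat) (j : Int) (nap : List Int) (ordL : List String) (acc : List String) :
    List Int × List String :=
  match fuel with
  | 0 => (nap, acc)
  | fuel + 1 =>
    if PySem.List.count nap j ≠ 0 then
      match PySem.List.index? nap j with
      | some ind =>
          pvInnerA fuel j (nap.set ind (-1)) ordL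
            (acc ++ (match PySem.List.pyGet? ordL (ind : Int) with
                     | some s => [s]
                     | none => []))   -- unreachable: ind < len nap = len ordL
      | none => (nap, acc)           -- unreachable: count ≠ 0
    else (nap, acc)

-- outer 'while j <= max(napelidos)' loop; fuel bounds the number of guard checks (j runs 1..max,
-- and max(napelidos) never grows, so max+2 checks suffice; fuel only makes the recursion total).
def pvOuterA (fuel : Nat) (j : Int) (nap : List Int) (ordL : List String) (acc : List String) :
    List String :=
  match fuel with
  | 0 => acc
  | fuel + 1 =>
    match PySem.List.max? nap (fun x => x) with
    | none => acc                    -- Python: max([]) raises ValueError; excluded by Pre_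
    | some m =>
      if j ≤ m then
        let st := pvInnerA (PySem.List.count nap j) j nap ordL acc
        pvOuterA fuel (j + 1) st.1 ordL st.2
      else acc

def apelidos (nomes : List String) : List String :=
  let ordL := PySem.List.sorted nomes (fun x => x)
  let nap := (PySem.List.pyRange 0 (PySem.List.len ordL)).foldl
      (fun acc i => acc ++ [pvCnt (PySem.List.pyGetD ordL i "")]) []   -- ord[i] is always in range
  pvOuterA (match PySem.List.max? nap (fun x => x) with
            | some m => m.toNat + 2
            | none => 0) 1 nap ordL []

-- ===== PORT B =====
def apelidos_alt (nomes : List String) : List String :=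
  let counts := nomes.map (fun n => pvCnt n)
  match PySem.List.max? counts (fun x => x) with
  | none => []                       -- Python: max([]) raises ValueError; excluded by Pre_
  | some m =>
    -- buckets[c].append(n): c = n.count(" ") is 0 ≤ c ≤ m, so .toNat/getD/set are exact here
    let buckets := (nomes.zip counts).foldl
        (fun bs p => bs.set p.2.toNat (bs.getD p.2.toNat [] ++ [p.1]))
        (List.replicate (m.toNat + 1) ([] : List String))
    (PySem.List.pyRange 1 (m + 1)).foldl
        (fun res j => res ++ PySem.List.sorted (buckets.getD j.toNat []) (fun x => x)) []

-- ===== PRECONDITION & SPEC =====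
-- Pre_ excludes only the empty list, on which both Pythons raise ValueError (max() of an empty sequence).
def Pre_apelidos (nomes : List String) : Prop := nomes ≠ []
instance (nomes : List String) : Decidable (Pre_apelidos nomes) := by unfold Pre_apelidos; infer_instance
def pvWitness_apelidos : List String := ["a b", "c", "d e f"]
def Spec_apelidos (nomes : List String) (out : List String) : Prop := out = apelidos_alt nomes
instance (nomes : List String) (out : List String) : Decidable (Spec_apelidos nomes out) := by unfold Spec_apelidos; infer_instance

-- ===== CLAIM (what is proved, stated in full; the proofs are below) =====
def Claim_equal_apelidos : Prop := ∀ (nomes : List String), Dom_apelidos nomes → Pre_apelidos nomes → Spec_apelidos nomes (apelidos nomes)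

-- ===== LEMMAS AND PROOFS =====

-- the count function applied after marking the values 1..j-1 with -1 (state of napelidos
-- at the start of the outer iteration for j)
def pvG (j : Int) (s : String) : Int := if 1 ≤ pvCnt s ∧ pvCnt s < j then -1 else pvCnt s

theorem pvCnt_nonneg (s : String) : 0 ≤ pvCnt s := by
  simp [pvCnt]

theorem pvG_one (s : String) : pvG 1 s = pvCnt s := by
  simp [pvG]

-- the common normal form both ports are reduced to
def pvSpecForm (nomes : List String) (M : Int) : List String :=
  (PySem.List.pyRange 1 (M + 1)).flatMap
    (fun i => (PySem.List.sorted nomes (fun x => x)).filter (fun s => pvCnt s == i))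

theorem pvNap_eq (ordL : List String) :
    (PySem.List.pyRange 0 (PySem.List.len ordL)).foldl
      (fun acc i => acc ++ [pvCnt (PySem.List.pyGetD ordL i "")]) []
    = ordL.map pvCnt := by
  rw [PySem.List.foldl_append_singleton_eq_map]
  calc (List.map (fun i => pvCnt (PySem.List.pyGetD ordL i "")) (PySem.List.pyRange 0 (PySem.List.len ordL)))
      = List.map pvCnt (List.map (fun j => PySem.List.pyGetD ordL j "") (PySem.List.pyRange 0 (PySem.List.len ordL))) := by
        rw [List.map_map]; rfl
    _ = ordL.map pvCnt := by rw [PySem.List.map_pyGetD_pyRange_zero]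

theorem pvInnerA_spec (g : String → Int) (j : Int) (hj : j ≠ -1) :
    ∀ (suf : List String) (pre : List Int) (ordPre acc : List String) (fuel : Nat),
      j ∉ pre → pre.length = ordPre.length → ((suf.map g).count j) ≤ fuel →
      pvInnerA fuel j (pre ++ suf.map g) (ordPre ++ suf) acc
        = (pre ++ suf.map (fun s => if g s = j then -1 else g s),
           acc ++ suf.filter (fun s => g s == j)) := by
  intro suf
  induction suf with
  | nil =>
    intro pre ordPre acc fuel hpre hlen _
    have hcount : PySem.List.count (pre ++ ([] : List String).map g) j = 0 := by
      simp [PySem.List.count_eq, List.count_eq_zero]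
      exact fun h => hpre h
    cases fuel with
    | zero => simp [pvInnerA]
    | succ f =>
      rw [pvInnerA, if_neg (by simp [List.count_eq_zero_of_not_mem hpre])]
      simp
  | cons s t ih =>
    intro pre ordPre acc fuel hpre hlen hfuel
    by_cases hg : g s = j
    · -- first occurrence is at position pre.length
      have hcnt : ((s :: t).map g).count j = (t.map g).count j + 1 := by
        simp [hg]
      rw [hcnt] at hfuel
      obtain ⟨f, rfl⟩ : ∃ f, fuel = f + 1 := ⟨fuel - 1, by omega⟩
      have hfuel' : (t.map g).count j ≤ f := by omega
      have hidx : PySem.List.index? (pre ++ (s :: t).map g) j = some pre.length := by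
        rw [PySem.List.index?_eq_some_iff]
        exact ⟨pre, t.map g, by simp [hg], rfl, hpre⟩
      have hcount0 : PySem.List.count (pre ++ (s :: t).map g) j ≠ 0 := by
        simp [PySem.List.count_eq, List.count_append, hg]
      have hget : PySem.List.pyGet? (ordPre ++ s :: t) (pre.length : Int) = some s := by
        rw [PySem.List.pyGet?_natCast, hlen]
        simp
      have hset : (pre ++ (s :: t).map g).set pre.length (-1) = (pre ++ [-1]) ++ t.map g := by
        rw [List.set_append]
        simp
      rw [pvInnerA]
      simp only [hidx, hget, hset]
      have := ih (pre ++ [-1]) (ordPre ++ [s]) (acc ++ [s]) f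
        (by simp [hpre]; omega) (by simp [hlen]) hfuel'
      rw [if_pos hcount0, show ordPre ++ s :: t = (ordPre ++ [s]) ++ t from by simp, this]
      simp [hg]
    · -- g s ≠ j: fold s into the processed prefix
      have := ih (pre ++ [g s]) (ordPre ++ [s]) acc fuel
        (by simp [hpre]; exact fun h => hg h.symm) (by simp [hlen])
        (by simpa [List.count_cons, hg] using hfuel)
      have heq1 : pre ++ (s :: t).map g = (pre ++ [g s]) ++ t.map g := by simp
      have heq2 : ordPre ++ s :: t = (ordPre ++ [s]) ++ t := by simp
      rw [heq1, heq2, this]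
      simp [hg]


-- max of the marked list: the guard j ≤ max(napelidos) holds iff some name still has ≥ j spaces
theorem pvGuard_iff (ordL : List String) (j m : Int) (hj : 1 ≤ j)
    (hm : PySem.List.max? (ordL.map (pvG j)) (fun x => x) = some m) :
    j ≤ m ↔ ∃ s ∈ ordL, j ≤ pvCnt s := by
  constructor
  · intro hjm
    have hmem := PySem.List.max?_mem hm
    obtain ⟨s, hs, hgs⟩ := List.mem_map.mp hmem
    refine ⟨s, hs, ?_⟩
    by_cases hc : 1 ≤ pvCnt s ∧ pvCnt s < j
    · rw [← hgs] at hjm; simp [pvG, hc] at hjm; omega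
    · rw [← hgs] at hjm; simpa [pvG, hc] using hjm
  · rintro ⟨s, hs, hjs⟩
    have hle := PySem.List.max?_isMax hm (pvG j s) (List.mem_map_of_mem hs)
    have : pvG j s = pvCnt s := by simp [pvG]; omega
    simp only at hle; omega

theorem pvOuterA_spec (ordL : List String) (M : Int)
    (hM : ∀ s ∈ ordL, pvCnt s ≤ M) :
    ∀ (fuel : Nat) (j : Int) (acc : List String), 1 ≤ j → M < j + fuel →
      pvOuterA fuel j (ordL.map (pvG j)) ordL acc
        = acc ++ (PySem.List.pyRange j (M + 1)).flatMap
            (fun i => ordL.filter (fun s => pvCnt s == i)) := by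
  intro fuel
  induction fuel with
  | zero =>
    intro j acc hj hb
    have hnil : PySem.List.pyRange j (M + 1) = [] := by
      refine List.eq_nil_iff_forall_not_mem.mpr (fun x hx => ?_)
      have := PySem.List.mem_pyRange_one.mp hx
      omega
    simp [pvOuterA, hnil]
  | succ fuel ih =>
    intro j acc hj hb
    by_cases hord : ordL = []
    · subst hord
      simp [pvOuterA, show PySem.List.max? ([] : List Int) (fun x => x) = none from
        (PySem.List.max?_eq_none_iff _ _).mpr rfl]
    · obtain ⟨m, hm⟩ : ∃ m, PySem.List.max? (ordL.map (pvG j)) (fun x => x) = some m := by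
        cases h : PySem.List.max? (ordL.map (pvG j)) (fun x => x) with
        | none =>
          exact absurd ((PySem.List.max?_eq_none_iff _ _).mp h) (by simp [hord])
        | some m => exact ⟨m, rfl⟩
      rw [pvOuterA, hm]; dsimp only
      by_cases hguard : j ≤ m
      · rw [if_pos hguard]
        obtain ⟨s0, hs0, hjs0⟩ := (pvGuard_iff ordL j m hj hm).mp hguard
        have hinner := pvInnerA_spec (pvG j) j (by omega) ordL [] [] acc
          (PySem.List.count (ordL.map (pvG j)) j)
          (by simp) rfl (by rw [PySem.List.count_eq])
        simp only [List.nil_append] at hinner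
        rw [hinner]
        have hmapstep : ordL.map (fun s => if pvG j s = j then -1 else pvG j s)
            = ordL.map (pvG (j + 1)) := by
          refine List.map_congr_left (fun s _ => ?_)
          simp only [pvG]
          split_ifs <;> omega
        have hfilstep : ordL.filter (fun s => pvG j s == j)
            = ordL.filter (fun s => pvCnt s == j) := by
          refine List.filter_congr (fun s _ => ?_)
          simp only [pvG]
          split_ifs with h
          · have e1 : ((-1 : Int) == j) = false := by simp; omega
            have e2 : (pvCnt s == j) = false := by simp; omega
            rw [e1, e2]
          · rfl
        rw [hmapstep, hfilstep, ih (j + 1) (acc ++ ordL.filter (fun s => pvCnt s == j))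
          (by omega) (by omega)]
        have hjM : j < M + 1 := by
          have := hM s0 hs0; omega
        rw [PySem.List.pyRange_one_cons hjM, List.flatMap_cons, List.append_assoc]
      · rw [if_neg hguard]
        have hnot : ∀ s ∈ ordL, pvCnt s < j := by
          intro s hs
          by_contra hle
          exact hguard ((pvGuard_iff ordL j m hj hm).mpr ⟨s, hs, by omega⟩)
        have hflat : (PySem.List.pyRange j (M + 1)).flatMap
            (fun i => ordL.filter (fun s => pvCnt s == i)) = [] := by
          refine List.flatMap_eq_nil_iff.mpr (fun i hi => ?_)
          have hji := PySem.List.mem_pyRange_one.mp hi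
          refine List.filter_eq_nil_iff.mpr (fun s hs => ?_)
          have := hnot s hs
          simp only [beq_iff_eq]
          omega
        rw [hflat, List.append_nil]

-- the max of a list of ints only depends on the multiset of its elements
theorem pvMax_perm (l1 l2 : List Int) (h : l1.Perm l2) :
    PySem.List.max? l1 (fun x => x) = PySem.List.max? l2 (fun x => x) := by
  cases h1 : PySem.List.max? l1 (fun x => x) with
  | none =>
    have := (PySem.List.max?_eq_none_iff l1 (fun x => x)).mp h1
    subst this
    rw [(PySem.List.max?_eq_none_iff l2 (fun x => x)).mpr h.nil_eq.symm]
  | some m1 =>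
    cases h2 : PySem.List.max? l2 (fun x => x) with
    | none =>
      have := (PySem.List.max?_eq_none_iff l2 (fun x => x)).mp h2
      subst this
      rw [(PySem.List.max?_eq_none_iff l1 (fun x => x)).mpr h.symm.nil_eq.symm] at h1
      exact absurd h1 (by simp)
    | some m2 =>
      have h12 := PySem.List.max?_isMax h2 m1 (h.mem_iff.mp (PySem.List.max?_mem h1))
      have h21 := PySem.List.max?_isMax h1 m2 (h.mem_iff.mpr (PySem.List.max?_mem h2))
      exact congrArg some (le_antisymm h12 h21)

theorem pvA_eq (nomes : List String) (M : Int)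
    (hmax : PySem.List.max? (nomes.map pvCnt) (fun x => x) = some M) :
    apelidos nomes = pvSpecForm nomes M := by
  have hperm : ((PySem.List.sorted nomes (fun x => x)).map pvCnt).Perm (nomes.map pvCnt) :=
    (PySem.List.sorted_perm nomes (fun x => x) false).map pvCnt
  have hmax' : PySem.List.max? ((PySem.List.sorted nomes (fun x => x)).map pvCnt) (fun x => x)
      = some M := by
    rw [pvMax_perm _ _ hperm, hmax]
  have h0 : 0 ≤ M := by
    obtain ⟨s, _, hs⟩ := List.mem_map.mp (PySem.List.max?_mem hmax)
    have := pvCnt_nonneg s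
    omega
  have hMle : ∀ s ∈ PySem.List.sorted nomes (fun x => x), pvCnt s ≤ M := by
    intro s hs
    exact PySem.List.max?_isMax hmax' (pvCnt s) (List.mem_map_of_mem hs)
  have hg1 : (PySem.List.sorted nomes (fun x => x)).map pvCnt
      = (PySem.List.sorted nomes (fun x => x)).map (pvG 1) :=
    List.map_congr_left (fun s _ => (pvG_one s).symm)
  rw [apelidos]
  simp only [pvNap_eq, hmax']
  rw [hg1, pvOuterA_spec (PySem.List.sorted nomes (fun x => x)) M hMle (M.toNat + 2) 1 []
    (by omega) (by omega)]
  simp [pvSpecForm]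

theorem pvBuckets_getD (k : Nat) :
    ∀ (nomes : List String) (bs : List (List String)),
      (∀ n ∈ nomes, (pvCnt n).toNat < bs.length) →
      ((nomes.foldl (fun bs n => bs.set (pvCnt n).toNat (bs.getD (pvCnt n).toNat [] ++ [n])) bs).getD k [])
        = bs.getD k [] ++ nomes.filter (fun n => (pvCnt n).toNat == k) := by
  intro nomes
  induction nomes with
  | nil => intro bs _; simp
  | cons n t ih =>
    intro bs hlt
    have hn := hlt n (by simp)
    have hlen : (bs.set (pvCnt n).toNat (bs.getD (pvCnt n).toNat [] ++ [n])).length = bs.length := by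
      simp
    rw [List.foldl_cons, ih _ (fun x hx => by rw [hlen]; exact hlt x (by simp [hx]))]
    by_cases hk : (pvCnt n).toNat = k
    · subst hk
      rw [List.filter_cons_of_pos (by simp)]
      have : (bs.set (pvCnt n).toNat (bs.getD (pvCnt n).toNat [] ++ [n])).getD (pvCnt n).toNat []
          = bs.getD (pvCnt n).toNat [] ++ [n] := by
        simp [List.getD, hn]
      rw [this, List.append_assoc]
      rfl
    · rw [List.filter_cons_of_neg (by simp [hk])]
      have : (bs.set (pvCnt n).toNat (bs.getD (pvCnt n).toNat [] ++ [n])).getD k []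
          = bs.getD k [] := by
        simp [List.getD, hk]
      rw [this]

theorem pvB_eq (nomes : List String) (M : Int)
    (hmax : PySem.List.max? (nomes.map pvCnt) (fun x => x) = some M) :
    apelidos_alt nomes = pvSpecForm nomes M := by
  have h0 : 0 ≤ M := by
    obtain ⟨s, _, hs⟩ := List.mem_map.mp (PySem.List.max?_mem hmax)
    have := pvCnt_nonneg s
    omega
  have hMle : ∀ n ∈ nomes, pvCnt n ≤ M := fun n hn =>
    PySem.List.max?_isMax hmax (pvCnt n) (List.mem_map_of_mem hn)
  have hzip : nomes.zip (nomes.map (fun n => pvCnt n)) = nomes.map (fun n => (n, pvCnt n)) := by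
    rw [← List.zip_map', List.map_id']
  rw [apelidos_alt]
  simp only [hmax, hzip, List.foldl_map]
  rw [PySem.List.foldl_append_eq_flatMap]
  rw [pvSpecForm]
  refine List.flatMap_congr (fun j hj => ?_)
  obtain ⟨hj1, hj2⟩ := PySem.List.mem_pyRange_one.mp hj
  have hbucket := pvBuckets_getD j.toNat nomes (List.replicate (M.toNat + 1) ([] : List String))
    (fun n hn => by have := hMle n hn; have := pvCnt_nonneg n; simp; omega)
  rw [hbucket]
  have hrepl : (List.replicate (M.toNat + 1) ([] : List String)).getD j.toNat [] = [] := by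
    simp only [List.getD, List.getElem?_replicate]
    rw [if_pos (by omega)]
    rfl
  rw [hrepl, List.nil_append]
  have hfil : nomes.filter (fun n => (pvCnt n).toNat == j.toNat)
      = nomes.filter (fun n => pvCnt n == j) := by
    refine List.filter_congr (fun n _ => ?_)
    have := pvCnt_nonneg n
    by_cases h : pvCnt n = j
    · rw [h]; simp
    · have e1 : ((pvCnt n).toNat == j.toNat) = false := by simp; omega
      have e2 : (pvCnt n == j) = false := by simp [h]
      rw [e1, e2]
  rw [hfil]
  refine PySem.List.sorted_id_eq_of_perm_of_pairwise _ _ ?_ ?_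
  · exact ((PySem.List.sorted_perm nomes (fun x => x) false).filter _)
  · exact (PySem.List.sorted_pairwise nomes (fun x => x)).filter _

-- ===== VERDICT (by name: the statement is the Claim_ definition above) =====
theorem apelidos_spec : Claim_equal_apelidos := by
  intro nomes _ hpre
  unfold Spec_apelidos
  have hne : nomes.map pvCnt ≠ [] := by
    intro h; exact hpre (List.map_eq_nil_iff.mp h)
  obtain ⟨M, hM⟩ : ∃ M, PySem.List.max? (nomes.map pvCnt) (fun x => x) = some M := by
    cases h : PySem.List.max? (nomes.map pvCnt) (fun x => x) with
    | none => exact absurd ((PySem.List.max?_eq_none_iff _ _).mp h) hne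
    | some m => exact ⟨m, rfl⟩
  rw [pvA_eq nomes M hM, pvB_eq nomes M hM]
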